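-- pv_equiv track=rewrite | github.com/bokar83/agentHQ | skills/linkedin_mvm/render_pdf_local.py | strip_redundant_cover_lines
-- ===== SOURCE A (Python) =====
-- def strip_redundant_cover_lines(body_md: str) -> str:
--     """Source markdown also has H1 + cover info inline; strip so we don't double-print."""
--     lines = body_md.split("\n")
--     out: list[str] = []
--     h1_seen = False
--     skip_window = 0
--     for ln in lines:
--         if not h1_seen and ln.startswith("# "):
--             h1_seen = True
--             skip_window = 8
--             continue
--         if h1_seen and skip_window > 0:
--             stripped = ln.strip()
--             if stripped.startswith(("## ", "By ", "Catalyst", "April")) or stripped == "" or stripped == "---":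
--                 skip_window -= 1
--                 continue
--             else:
--                 skip_window = 0
--         out.append(ln)
--     # Drop one leading separator
--     while out and out[0].strip() in ("", "---"):
--         out.pop(0)
--     return "\n".join(out)
-- ===== SOURCE B (Python) =====
-- def _is_cover(line: str) -> bool:
--     s = line.strip()
--     return s.startswith(("## ", "By ", "Catalyst", "April")) or s == "" or s == "---"
--
--
-- def strip_redundant_cover_lines(body_md: str) -> str:
--     """Index-based rewrite: locate the first H1, drop it plus the capped run of
--     cover lines after it, then trim leading separators."""
--     lines = body_md.split("\n")
--     h1 = next((i for i, ln in enumerate(lines) if ln.startswith("# ")), None)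
--     if h1 is None:
--         kept = lines
--     else:
--         j = h1 + 1
--         end = min(len(lines), h1 + 9)
--         while j < end and _is_cover(lines[j]):
--             j += 1
--         kept = lines[:h1] + lines[j:]
--     k = 0
--     while k < len(kept) and kept[k].strip() in ("", "---"):
--         k += 1
--     return "\n".join(kept[k:])
-- ===== Notes on version B (the rewrite author's own statement) =====
-- stated objective: simpler
-- what changed: Replaced A's flag-driven single loop (h1_seen/skip_window state machine with a pop(0) trim loop) by an index-based decomposition: find the first H1, measure the capped run of cover lines after it, splice lines[:h1]+lines[j:], and dropWhile leading separators.
import Mathlib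
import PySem

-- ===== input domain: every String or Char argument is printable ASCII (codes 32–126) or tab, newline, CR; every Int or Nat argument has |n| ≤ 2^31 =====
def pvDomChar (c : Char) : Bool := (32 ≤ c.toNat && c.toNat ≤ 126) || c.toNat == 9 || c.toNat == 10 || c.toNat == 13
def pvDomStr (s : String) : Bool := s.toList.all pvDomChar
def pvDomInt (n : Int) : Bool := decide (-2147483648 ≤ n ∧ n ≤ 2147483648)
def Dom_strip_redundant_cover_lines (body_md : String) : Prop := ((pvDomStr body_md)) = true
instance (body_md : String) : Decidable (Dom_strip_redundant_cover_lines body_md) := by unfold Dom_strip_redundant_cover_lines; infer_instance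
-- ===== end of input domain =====

-- B replaces A's flag-driven state machine by an index-based splice (find H1, cap the cover run, take/drop); objective: simpler.

-- ===== PORT A =====
-- A's for-loop with state (h1_seen, skip_window) and out-append, as structural recursion over the lines
def stripA_loop : Bool → Nat → List String → List String
  | _, _, [] => []
  | h1, skip, ln :: rest =>
    if !h1 && PySem.Str.startswith ln "# " then
      stripA_loop true 8 rest
    else if h1 && skip > 0 then
      let s := PySem.Str.strip ln
      if PySem.Str.startswith s "## " || PySem.Str.startswith s "By " ||
         PySem.Str.startswith s "Catalyst" || PySem.Str.startswith s "April" ||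
         s == "" || s == "---" then
        stripA_loop h1 (skip - 1) rest
      else
        ln :: stripA_loop h1 0 rest
    else
      ln :: stripA_loop h1 skip rest

-- A's `while out and out[0].strip() in ("", "---"): out.pop(0)`
def stripA_trim : List String → List String
  | [] => []
  | x :: r =>
    if PySem.Str.strip x == "" || PySem.Str.strip x == "---" then stripA_trim r else x :: r

def strip_redundant_cover_lines (body_md : String) : String :=
  PySem.Str.join "\n" (stripA_trim (stripA_loop false 0 ((PySem.Str.split? body_md "\n").getD [])))

-- ===== PORT B =====
def isCover (ln : String) : Bool :=
  let s := PySem.Str.strip ln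
  PySem.Str.startswith s "## " || PySem.Str.startswith s "By " ||
  PySem.Str.startswith s "Catalyst" || PySem.Str.startswith s "April" ||
  s == "" || s == "---"

-- B's `while j < end and _is_cover(lines[j]): j += 1` (budget-capped run length)
def coverRun : Nat → List String → Nat
  | 0, _ => 0
  | _, [] => 0
  | Nat.succ c, ln :: rest => if isCover ln then coverRun c rest + 1 else 0

def strip_redundant_cover_lines_alt (body_md : String) : String :=
  let lines := (PySem.Str.split? body_md "\n").getD []
  let kept :=
    match lines.findIdx? (fun ln => PySem.Str.startswith ln "# ") with
    | none => lines
    | some i =>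
      let tail := lines.drop (i + 1)
      lines.take i ++ tail.drop (coverRun 8 tail)
  PySem.Str.join "\n"
    (kept.dropWhile (fun x => PySem.Str.strip x == "" || PySem.Str.strip x == "---"))

-- ===== PRECONDITION & SPEC =====
def Spec_strip_redundant_cover_lines (body_md : String) (out : String) : Prop := out = strip_redundant_cover_lines_alt body_md
instance (body_md : String) (out : String) : Decidable (Spec_strip_redundant_cover_lines body_md out) := by unfold Spec_strip_redundant_cover_lines; infer_instance

-- ===== CLAIM (what is proved, stated in full; the proofs are below) =====
def Claim_equal_strip_redundant_cover_lines : Prop := ∀ (body_md : String), Dom_strip_redundant_cover_lines body_md → Spec_strip_redundant_cover_lines body_md (strip_redundant_cover_lines body_md)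

-- ===== LEMMAS AND PROOFS =====

theorem trim_eq_dropWhile (ls : List String) :
    stripA_trim ls = ls.dropWhile (fun x => PySem.Str.strip x == "" || PySem.Str.strip x == "---") := by
  induction ls with
  | nil => rfl
  | cons x r ih =>
    simp only [stripA_trim, List.dropWhile_cons]
    split_ifs <;> simp_all

theorem loopA_step_true (c : Nat) (ln : String) (rest : List String) :
    stripA_loop true (c + 1) (ln :: rest) =
      if isCover ln then stripA_loop true c rest else ln :: stripA_loop true 0 rest := by
  simp only [stripA_loop, isCover]
  split <;> simp_all

theorem loopA_step_false (skip : Nat) (ln : String) (rest : List String) :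
    stripA_loop false skip (ln :: rest) =
      if PySem.Str.startswith ln "# " then stripA_loop true 8 rest
      else ln :: stripA_loop false skip rest := by
  simp only [stripA_loop]
  split <;> simp_all

theorem loopA_true (skip : Nat) (ls : List String) :
    stripA_loop true skip ls = ls.drop (coverRun skip ls) := by
  induction ls generalizing skip with
  | nil => cases skip <;> rfl
  | cons ln rest ih =>
    cases skip with
    | zero => simp [stripA_loop, coverRun, ih 0]
    | succ c =>
      rw [loopA_step_true]
      by_cases h : isCover ln
      · rw [if_pos h, ih c]
        simp [coverRun, h]
      · rw [if_neg h, ih 0]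
        simp [coverRun, h]

theorem loopA_false (skip : Nat) (ls : List String) :
    stripA_loop false skip ls =
      match ls.findIdx? (fun ln => PySem.Str.startswith ln "# ") with
      | none => ls
      | some i =>
        let tail := ls.drop (i + 1)
        ls.take i ++ tail.drop (coverRun 8 tail) := by
  induction ls generalizing skip with
  | nil => rfl
  | cons ln rest ih =>
    rw [loopA_step_false]
    by_cases h : PySem.Str.startswith ln "# " = true
    · rw [if_pos h]
      simp only [List.findIdx?_cons, h, if_pos]
      simp [loopA_true]
    · rw [if_neg h, ih skip]
      simp only [List.findIdx?_cons]
      rw [if_neg h]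
      cases hf : rest.findIdx? (fun ln => PySem.Str.startswith ln "# ") with
      | none => simp
      | some i => simp [List.take_succ_cons, List.drop_succ_cons]

-- ===== VERDICT (by name: the statement is the Claim_ definition above) =====
theorem strip_redundant_cover_lines_spec : Claim_equal_strip_redundant_cover_lines := by
  intro body_md _
  unfold Spec_strip_redundant_cover_lines strip_redundant_cover_lines strip_redundant_cover_lines_alt
  rw [trim_eq_dropWhile, loopA_false]
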